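-- pv_equiv track=rewrite | github.com/utsmok/MEEWI | data/shorten_cerif_specs.py | analyze_entity_hierarchy
-- ===== SOURCE A (Python) =====
-- def analyze_entity_hierarchy(entities, link_tables):
--     """Analyze potential hierarchy among entities based on naming conventions."""
--     hierarchy = {}
--
--     # Group similar entities (e.g., cfResult, cfResultPublication, cfResultPatent)
--     for entity in entities:
--         # Skip link tables
--         if "_" in entity:
--             continue
--
--         # Find parent entity if this is a subtype
--         parent = None
--         for potential_parent in entities:
--             if potential_parent != entity and entity.startswith(potential_parent):
--                 # This is a potential parent-child relationship
--                 if parent is None or len(potential_parent) > len(parent):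
--                     parent = potential_parent
--
--         if parent:
--             if parent not in hierarchy:
--                 hierarchy[parent] = []
--             hierarchy[parent].append(entity)
--
--     return hierarchy
-- ===== SOURCE B (Python) =====
-- def analyze_entity_hierarchy(entities, link_tables):
--     """Analyze potential hierarchy among entities based on naming conventions."""
--     names = set(entities)
--     hierarchy = {}
--
--     for entity in entities:
--         # Skip link tables
--         if "_" in entity:
--             continue
--
--         # Longest proper non-empty prefix of `entity` that is itself an entity:
--         # try prefixes from longest to shortest and take the first hit.
--         parent = None
--         for cut in range(len(entity) - 1, 0, -1):
--             prefix = entity[:cut]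
--             if prefix in names:
--                 parent = prefix
--                 break
--
--         if parent is not None:
--             hierarchy.setdefault(parent, []).append(entity)
--
--     return hierarchy
-- ===== Notes on version B (the rewrite author's own statement) =====
-- stated objective: faster
-- what changed: Instead of scanning the whole entity list for each entity to find the longest prefix parent, B builds a set of names once and, per entity, probes its own prefixes from longest to shortest until one is in the set.
import Mathlib
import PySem

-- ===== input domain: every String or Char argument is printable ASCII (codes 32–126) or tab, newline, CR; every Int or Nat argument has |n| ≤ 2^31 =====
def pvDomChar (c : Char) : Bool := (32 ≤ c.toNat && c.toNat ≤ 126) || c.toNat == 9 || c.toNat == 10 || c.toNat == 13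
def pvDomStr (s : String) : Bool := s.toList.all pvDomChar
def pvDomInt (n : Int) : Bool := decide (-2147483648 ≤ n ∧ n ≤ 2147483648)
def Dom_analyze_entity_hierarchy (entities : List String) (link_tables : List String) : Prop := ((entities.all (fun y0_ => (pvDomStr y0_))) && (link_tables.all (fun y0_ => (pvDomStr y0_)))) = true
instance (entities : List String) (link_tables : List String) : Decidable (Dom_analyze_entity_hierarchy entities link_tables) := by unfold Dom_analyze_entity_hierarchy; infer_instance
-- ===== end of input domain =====

-- B replaces A's inner scan over all entities (to find the longest prefix parent) by probing
-- the entity's own prefixes, longest first, against a set of names built once.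

-- ===== PORT A =====
-- the body of A's inner `for potential_parent in entities` loop
def pvAStep (entity : String) (parent : Option String) (p : String) : Option String :=
  if (p != entity) && PySem.Str.startswith entity p then
    match parent with
    | none => some p
    | some q => if PySem.Str.len q < PySem.Str.len p then some p else some q
  else parent

def pvAInner (entities : List String) (entity : String) : Option String :=
  entities.foldl (pvAStep entity) none

def analyze_entity_hierarchy (entities : List String) (link_tables : List String) : List (String × List String) :=
  (entities.foldl (fun h entity =>
    if PySem.Str.isIn "_" entity then h
    else
      match pvAInner entities entity with
      | some parent =>
        -- `if parent:` — truthy iff the found parent is a nonempty string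
        if parent != "" then
          -- `if parent not in hierarchy: hierarchy[parent] = []`, then `hierarchy[parent].append(entity)`
          (if h.contains parent then h else h.insert parent []).modify parent [] (· ++ [entity])
        else h
      | none => h) PySem.Dict.empty).items

-- ===== PORT B =====
-- B's `for cut in range(len(entity)-1, 0, -1): … break` loop, by recursion on cut;
-- `entity[:cut]` for 0 ≤ cut ≤ len(entity) is exactly `String.ofList (cs.take cut)`.
def pvFindParent (names : PySem.Set String) (cs : List Char) : Nat → Option String
  | 0 => none
  | n + 1 =>
    let pre := String.ofList (cs.take (n + 1))
    if names.contains pre then some pre else pvFindParent names cs n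

def analyze_entity_hierarchy_alt (entities : List String) (link_tables : List String) : List (String × List String) :=
  let names := PySem.Set.ofList entities
  (entities.foldl (fun h entity =>
    if PySem.Str.isIn "_" entity then h
    else
      match pvFindParent names entity.toList (entity.toList.length - 1) with
      -- `hierarchy.setdefault(parent, []).append(entity)` sets d[parent] = d.get(parent, []) + [entity]
      | some parent => h.modify parent [] (· ++ [entity])
      | none => h) PySem.Dict.empty).items

-- ===== PRECONDITION & SPEC =====
def Spec_analyze_entity_hierarchy (entities : List String) (link_tables : List String) (out : List (String × List String)) : Prop := out = analyze_entity_hierarchy_alt entities link_tables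
instance (entities : List String) (link_tables : List String) (out : List (String × List String)) : Decidable (Spec_analyze_entity_hierarchy entities link_tables out) := by unfold Spec_analyze_entity_hierarchy; infer_instance

-- ===== CLAIM (what is proved, stated in full; the proofs are below) =====
def Claim_equal_analyze_entity_hierarchy : Prop := ∀ (entities : List String) (link_tables : List String), Dom_analyze_entity_hierarchy entities link_tables → Spec_analyze_entity_hierarchy entities link_tables (analyze_entity_hierarchy entities link_tables)

-- ===== LEMMAS AND PROOFS =====

lemma pvGood_iff (entity p : String) :
    ((p != entity) && PySem.Str.startswith entity p) = true ↔
      p.toList <+: entity.toList ∧ p.toList.length < entity.toList.length := by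
  simp only [Bool.and_eq_true, bne_iff_ne, PySem.Str.startswith_eq, PySem.Chars.startswith_iff]
  constructor
  · rintro ⟨hne, hpre⟩
    refine ⟨hpre, lt_of_le_of_ne hpre.length_le (fun e => hne ?_)⟩
    exact String.toList_inj.mp (List.IsPrefix.eq_of_length hpre (by omega))
  · rintro ⟨hpre, hlt⟩
    exact ⟨fun e => by subst e; omega, hpre⟩

lemma pvAStep_dominates (entity : String) (acc : Option String) (p a : String)
    (h : pvAStep entity acc p = some a) :
    acc = some a ∨ (((p != entity) && PySem.Str.startswith entity p) = true ∧ a = p) := by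
  unfold pvAStep at h
  by_cases hg : ((p != entity) && PySem.Str.startswith entity p) = true
  · rw [if_pos hg] at h
    cases acc with
    | none => right; exact ⟨hg, (Option.some_inj.mp h).symm⟩
    | some q =>
      simp only at h
      split at h
      · right; exact ⟨hg, (Option.some_inj.mp h).symm⟩
      · left; exact h.symm ▸ rfl
  · rw [if_neg hg] at h; left; exact h

lemma pvAStep_mono (entity : String) (acc : Option String) (p a : String)
    (h : acc = some a) :
    ∃ b, pvAStep entity acc p = some b ∧ a.toList.length ≤ b.toList.length := by
  subst h
  unfold pvAStep
  by_cases hg : ((p != entity) && PySem.Str.startswith entity p) = true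
  · rw [if_pos hg]
    simp only
    by_cases hlt : PySem.Str.len a < PySem.Str.len p
    · rw [if_pos hlt]
      refine ⟨p, rfl, ?_⟩
      simp only [PySem.Str.len] at hlt
      omega
    · rw [if_neg hlt]; exact ⟨a, rfl, le_refl _⟩
  · rw [if_neg hg]; exact ⟨a, rfl, le_refl _⟩

lemma pvAStep_good (entity : String) (acc : Option String) (p : String)
    (hg : ((p != entity) && PySem.Str.startswith entity p) = true) :
    ∃ b, pvAStep entity acc p = some b ∧ p.toList.length ≤ b.toList.length := by
  unfold pvAStep
  rw [if_pos hg]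
  cases acc with
  | none => exact ⟨p, rfl, le_refl _⟩
  | some q =>
    simp only
    by_cases hlt : PySem.Str.len q < PySem.Str.len p
    · rw [if_pos hlt]; exact ⟨p, rfl, le_refl _⟩
    · rw [if_neg hlt]
      refine ⟨q, rfl, ?_⟩
      simp only [PySem.Str.len, not_lt] at hlt
      omega

lemma pvAInner_fold_spec (entity : String) (l : List String) (acc : Option String) :
    (∀ a, l.foldl (pvAStep entity) acc = some a →
      acc = some a ∨ (a ∈ l ∧ ((a != entity) && PySem.Str.startswith entity a) = true)) ∧
    (∀ a, acc = some a →
      ∃ b, l.foldl (pvAStep entity) acc = some b ∧ a.toList.length ≤ b.toList.length) ∧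
    (∀ p ∈ l, ((p != entity) && PySem.Str.startswith entity p) = true →
      ∃ b, l.foldl (pvAStep entity) acc = some b ∧ p.toList.length ≤ b.toList.length) := by
  induction l generalizing acc with
  | nil => exact ⟨fun a h => Or.inl h, fun a h => ⟨a, h, le_refl _⟩, by simp⟩
  | cons p l ih =>
    obtain ⟨ih1, ih2, ih3⟩ := ih (pvAStep entity acc p)
    refine ⟨?_, ?_, ?_⟩
    · intro a h
      rcases ih1 a h with h' | h'
      · rcases pvAStep_dominates entity acc p a h' with h'' | ⟨hg, rfl⟩
        · exact Or.inl h''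
        · exact Or.inr ⟨List.mem_cons_self, hg⟩
      · exact Or.inr ⟨List.mem_cons_of_mem _ h'.1, h'.2⟩
    · intro a h
      obtain ⟨b, hb, hab⟩ := pvAStep_mono entity acc p a h
      obtain ⟨c, hc, hbc⟩ := ih2 b hb
      exact ⟨c, hc, le_trans hab hbc⟩
    · intro q hq hg
      rcases List.mem_cons.mp hq with rfl | hq'
      · obtain ⟨b, hb, hab⟩ := pvAStep_good entity acc q hg
        obtain ⟨c, hc, hbc⟩ := ih2 b hb
        exact ⟨c, hc, le_trans hab hbc⟩
      · exact ih3 q hq' hg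

lemma pvFindParent_eq_none (names : PySem.Set String) (cs : List Char) (k : Nat) :
    pvFindParent names cs k = none ↔
      ∀ l, 1 ≤ l → l ≤ k → names.contains (String.ofList (cs.take l)) = false := by
  induction k with
  | zero => simp [pvFindParent]; omega
  | succ n ih =>
    unfold pvFindParent
    by_cases hc : names.contains (String.ofList (cs.take (n + 1))) = true
    · simp only [hc, if_true]
      constructor
      · intro h; cases h
      · intro h; rw [h (n+1) (by omega) (by omega)] at hc; cases hc
    · simp only [Bool.not_eq_true] at hc
      simp only [hc, Bool.false_eq_true, if_false, ih]
      constructor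
      · intro h l h1 h2
        rcases Nat.lt_succ_iff_lt_or_eq.mp (Nat.lt_succ_of_le h2) with h3 | rfl
        · exact h l h1 (by omega)
        · exact hc
      · intro h l h1 h2; exact h l h1 (by omega)

lemma pvFindParent_eq_some (names : PySem.Set String) (cs : List Char) (k : Nat) (p : String) :
    pvFindParent names cs k = some p ↔
      ∃ l, 1 ≤ l ∧ l ≤ k ∧ names.contains (String.ofList (cs.take l)) = true ∧
        p = String.ofList (cs.take l) ∧
        ∀ l', l < l' → l' ≤ k → names.contains (String.ofList (cs.take l')) = false := by
  induction k with
  | zero =>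
    exact iff_of_false (by simp [pvFindParent]) (by rintro ⟨l, h1, h2, _⟩; omega)
  | succ n ih =>
    unfold pvFindParent
    by_cases hc : names.contains (String.ofList (cs.take (n + 1))) = true
    · simp only [hc, if_true]
      constructor
      · rintro h
        refine ⟨n + 1, by omega, le_refl _, hc, (Option.some_inj.mp h).symm, by omega⟩
      · rintro ⟨l, h1, h2, h3, rfl, h5⟩
        rcases Nat.lt_succ_iff_lt_or_eq.mp (Nat.lt_succ_of_le h2) with h6 | rfl
        · rw [h5 (n+1) (by omega) (le_refl _)] at hc; cases hc
        · rfl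
    · simp only [Bool.not_eq_true] at hc
      simp only [hc, Bool.false_eq_true, if_false, ih]
      constructor
      · rintro ⟨l, h1, h2, h3, rfl, h5⟩
        refine ⟨l, h1, by omega, h3, rfl, ?_⟩
        intro l' hl1 hl2
        rcases Nat.lt_succ_iff_lt_or_eq.mp (Nat.lt_succ_of_le hl2) with h6 | rfl
        · exact h5 l' hl1 (by omega)
        · exact hc
      · rintro ⟨l, h1, h2, h3, rfl, h5⟩
        rcases Nat.lt_succ_iff_lt_or_eq.mp (Nat.lt_succ_of_le h2) with h6 | rfl
        · exact ⟨l, h1, by omega, h3, rfl, fun l' a b => h5 l' a (by omega)⟩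
        · rw [h3] at hc; cases hc

lemma pvDict_update_agree (h : PySem.Dict String (List String)) (p : String) (e : String) :
    (if h.contains p then h else h.insert p []).modify p [] (· ++ [e]) =
      h.modify p [] (· ++ [e]) := by
  by_cases hc : h.contains p = true
  · rw [if_pos hc]
  · simp only [Bool.not_eq_true] at hc
    rw [if_neg (by simp [hc])]
    unfold PySem.Dict.modify
    rw [PySem.Dict.insert_insert_self, PySem.Dict.getD_insert_self]
    congr 1
    unfold PySem.Dict.getD
    rw [(PySem.Dict.get?_eq_none_iff_contains h p).mpr hc]
    rfl

lemma pvContains_good (entities : List String) (entity : String) (l : Nat)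
    (h1 : 1 ≤ l) (h2 : l ≤ entity.toList.length - 1)
    (hc : (PySem.Set.ofList entities).contains (String.ofList (entity.toList.take l)) = true) :
    String.ofList (entity.toList.take l) ∈ entities ∧
      ((String.ofList (entity.toList.take l) != entity) &&
        PySem.Str.startswith entity (String.ofList (entity.toList.take l))) = true ∧
      (String.ofList (entity.toList.take l)).toList.length = l := by
  have hmem : String.ofList (entity.toList.take l) ∈ entities :=
    (PySem.Set.mem_ofList entities _).mp ((PySem.Set.contains_iff _ _).mp hc)
  have hn : l < entity.toList.length := by omega
  have hlen : (entity.toList.take l).length = l := by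
    rw [List.length_take]; omega
  refine ⟨hmem, ?_, by rw [String.toList_ofList, hlen]⟩
  rw [pvGood_iff]
  rw [String.toList_ofList, hlen]
  exact ⟨List.take_prefix _ _, hn⟩

lemma pvParent_agree (entities : List String) (entity : String) :
    (match pvAInner entities entity with
     | some p => if p != "" then some p else none
     | none => none) =
    pvFindParent (PySem.Set.ofList entities) entity.toList (entity.toList.length - 1) := by
  obtain ⟨s1, _, s3⟩ := pvAInner_fold_spec entity entities none
  cases hA : pvAInner entities entity with
  | none =>
    simp only
    symm
    rw [pvFindParent_eq_none]
    intro l h1 h2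
    by_contra hc
    simp only [Bool.not_eq_false] at hc
    obtain ⟨hmem, hg, _⟩ := pvContains_good entities entity l h1 h2 hc
    obtain ⟨b, hb, _⟩ := s3 _ hmem hg
    rw [show List.foldl (pvAStep entity) none entities = pvAInner entities entity from rfl, hA] at hb; cases hb
  | some q =>
    rcases s1 q (show List.foldl (pvAStep entity) none entities = some q from hA) with h | ⟨hmem, hg⟩
    · cases h
    obtain ⟨hpre, hlt⟩ := (pvGood_iff entity q).mp hg
    have hq : q = String.ofList (entity.toList.take q.toList.length) := by
      conv_lhs => rw [← String.ofList_toList (s := q)]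
      congr 1
      exact List.prefix_iff_eq_take.mp hpre
    by_cases h0 : q.toList.length = 0
    · have hq'' : q = "" := by
        rw [← String.ofList_toList (s := q), List.length_eq_zero_iff.mp h0]
      simp only [hq'', bne_self_eq_false, Bool.false_eq_true, if_false]
      symm
      rw [pvFindParent_eq_none]
      intro l h1 h2
      by_contra hc
      simp only [Bool.not_eq_false] at hc
      obtain ⟨hmem', hg', hlen'⟩ := pvContains_good entities entity l h1 h2 hc
      obtain ⟨b, hb, hle⟩ := s3 _ hmem' hg'
      rw [show List.foldl (pvAStep entity) none entities = pvAInner entities entity from rfl, hA] at hb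
      rw [← Option.some_inj.mp hb] at hle
      rw [hlen'] at hle
      rw [hq''] at hle
      simp at hle
      omega
    · have hq' : (q != "") = true := by
        rw [bne_iff_ne]
        intro h
        rw [h] at h0
        exact h0 rfl
      simp only [hq', if_true]
      symm
      rw [pvFindParent_eq_some]
      refine ⟨q.toList.length, by omega, by omega, ?_, hq, ?_⟩
      · rw [← hq]
        exact (PySem.Set.contains_iff _ _).mpr ((PySem.Set.mem_ofList entities q).mpr hmem)
      · intro l' hl1 hl2
        by_contra hc
        simp only [Bool.not_eq_false] at hc
        obtain ⟨hmem', hg', hlen'⟩ := pvContains_good entities entity l' (by omega) hl2 hc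
        obtain ⟨b, hb, hle⟩ := s3 _ hmem' hg'
        rw [show List.foldl (pvAStep entity) none entities = pvAInner entities entity from rfl, hA] at hb
        rw [← Option.some_inj.mp hb] at hle
        rw [hlen'] at hle
        omega

-- ===== VERDICT (by name: the statement is the Claim_ definition above) =====
theorem analyze_entity_hierarchy_spec : Claim_equal_analyze_entity_hierarchy := by
  intro entities link_tables _
  unfold Spec_analyze_entity_hierarchy analyze_entity_hierarchy analyze_entity_hierarchy_alt
  congr 1
  apply PySem.List.foldl_congr_mem
  intro h entity _
  by_cases hin : PySem.Str.isIn "_" entity = true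
  · simp only [hin, if_true]
  · simp only [Bool.not_eq_true] at hin
    simp only [hin, Bool.false_eq_true, if_false]
    have hp := pvParent_agree entities entity
    cases hA : pvAInner entities entity with
    | none => simp only [hA] at hp; rw [← hp]
    | some p =>
      simp only [hA] at hp
      rw [← hp]
      by_cases hne : (p != "") = true
      · simp only [hne, if_true]
        exact pvDict_update_agree h p entity
      · simp only [Bool.not_eq_true] at hne
        simp [hne]
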